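-- pv_equiv track=rewrite | github.com/JeanPougetoux/cryptoDES | DESAlgo.py | getSubBlocs
-- ===== SOURCE A (Python) =====
-- def getSubBlocs(matrix) :
--     subBlocs = dict()
--     index = 0
--     subBlocs[index]=dict()
--
--     for i in range(0, len(matrix)) :
--         if i!=0 and (i)%6==0 :
--             index+=1
--             subBlocs[index]=dict()
--
--         subBlocs[index][i%6] = matrix[i]
--     return subBlocs
-- ===== SOURCE B (Python) =====
-- def getSubBlocs(matrix):
--     chunks = [matrix[i:i + 6] for i in range(0, len(matrix), 6)] or [[]]
--     return {g: dict(enumerate(block)) for g, block in enumerate(chunks)}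
-- ===== Notes on version B (the rewrite author's own statement) =====
-- stated objective: alternative
-- what changed: Replaced A's single flat pass that carries a mutable group counter and keys entries by i%6 with a two-stage decomposition: first slice the list into blocks via matrix[i:i+6] over a stride-6 range ('or [[]]' supplies the single empty block for empty input), then number groups and offsets with enumerate; no modulo or carried counter remains.
import Mathlib
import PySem

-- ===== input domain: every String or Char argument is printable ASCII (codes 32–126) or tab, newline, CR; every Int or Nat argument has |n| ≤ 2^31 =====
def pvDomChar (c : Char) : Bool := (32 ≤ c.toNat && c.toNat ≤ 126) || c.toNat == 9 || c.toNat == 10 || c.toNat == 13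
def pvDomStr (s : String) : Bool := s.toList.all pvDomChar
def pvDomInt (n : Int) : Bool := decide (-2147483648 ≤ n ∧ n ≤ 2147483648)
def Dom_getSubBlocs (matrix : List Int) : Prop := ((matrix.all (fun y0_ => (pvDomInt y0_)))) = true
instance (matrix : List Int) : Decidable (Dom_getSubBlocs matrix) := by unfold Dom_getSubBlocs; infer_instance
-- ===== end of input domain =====

-- B replaces A's flat counter-and-modulo pass with a recursive block splitter plus enumerate (objective: alternative).

-- ===== PORT A =====
-- literal transliteration of A: dict-of-dicts built in one pass carrying the group index
def getSubBlocs (matrix : List Int) : List (Int × List (Int × Int)) :=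
  let init : PySem.Dict Int (PySem.Dict Int Int) × Int :=
    ((PySem.Dict.empty).insert 0 PySem.Dict.empty, 0)
  let st := (PySem.List.pyRange 0 (matrix.length : Int) 1).foldl
    (fun (st : PySem.Dict Int (PySem.Dict Int Int) × Int) i =>
      let st' := if i ≠ 0 ∧ PySem.Int.mod i 6 = 0 then
          (st.1.insert (st.2 + 1) PySem.Dict.empty, st.2 + 1)
        else st
      (st'.1.modify st'.2 PySem.Dict.empty
          (fun inner => inner.insert (PySem.Int.mod i 6) (PySem.List.pyGetD matrix i 0)),
       st'.2)) init
  st.1.items.map (fun p => (p.1, p.2.items))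

-- ===== PORT B =====
-- literal transliteration of B: stride-6 slices make the chunk list ('or [[]]' = the if on empty),
-- then enumerate numbers the chunks and the elements of each chunk
def getSubBlocs_alt (matrix : List Int) : List (Int × List (Int × Int)) :=
  let chunksRaw := (PySem.List.pyRange 0 (matrix.length : Int) 6).map
    (fun i => PySem.List.slice matrix (some i) (some (i + 6)))
  let chunks := if chunksRaw = [] then [([] : List Int)] else chunksRaw
  (PySem.List.enumerate chunks 0).map (fun p => (p.1, PySem.List.enumerate p.2 0))

-- ===== PRECONDITION & SPEC =====
def Spec_getSubBlocs (matrix : List Int) (out : List (Int × List (Int × Int))) : Prop := out = getSubBlocs_alt matrix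
instance (matrix : List Int) (out : List (Int × List (Int × Int))) : Decidable (Spec_getSubBlocs matrix out) := by unfold Spec_getSubBlocs; infer_instance

-- ===== CLAIM (what is proved, stated in full; the proofs are below) =====
def Claim_equal_getSubBlocs : Prop := ∀ (matrix : List Int), Dom_getSubBlocs matrix → Spec_getSubBlocs matrix (getSubBlocs matrix)

-- ===== LEMMAS AND PROOFS =====

-- the inner dict of group g after the first m elements have been processed
def pvInner (matrix : List Int) (m g : Nat) : PySem.Dict Int Int :=
  PySem.Dict.mk ((List.range (min 6 (m - 6 * g))).map
    (fun (j : Nat) => ((j : Int), matrix.getD (6 * g + j) 0)))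

-- the outer dict after the first m elements have been processed
def pvOuter (matrix : List Int) (m : Nat) : PySem.Dict Int (PySem.Dict Int Int) :=
  PySem.Dict.mk ((List.range ((m - 1) / 6 + 1)).map
    (fun (g : Nat) => ((g : Int), pvInner matrix m g)))

lemma pv_cast_ne {g k : Nat} (h : g ≠ k) : (g : Int) ≠ (k : Int) := by exact_mod_cast h

lemma pv_find_none {ν : Type} (G : Nat) (f : Nat → ν) (k : Int) (hk : ∀ g, g < G → (g : Int) ≠ k) :
    List.find? (fun p => p.1 == k) ((List.range G).map (fun (g : Nat) => ((g : Int), f g))) = none := by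
  apply List.find?_eq_none.mpr
  intro p hp
  simp only [List.mem_map, List.mem_range] at hp
  obtain ⟨g, hg, rfl⟩ := hp
  simpa using hk g hg

lemma pv_replace_none {ν : Type} (G : Nat) (f : Nat → ν) (k : Int) (v : ν)
    (hk : ∀ g, g < G → (g : Int) ≠ k) :
    ((List.range G).map (fun (g : Nat) => ((g : Int), f g))).map
        (fun p => if p.1 == k then (k, v) else p)
      = (List.range G).map (fun (g : Nat) => ((g : Int), f g)) := by
  rw [List.map_map]
  apply List.map_congr_left
  intro g hg
  simp only [List.mem_range] at hg
  simp [hk g hg]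

lemma pv_inner_stable (matrix : List Int) (m g : Nat) (hg : 6 * (g + 1) ≤ m) :
    pvInner matrix (m + 1) g = pvInner matrix m g := by
  unfold pvInner
  have h1 : min 6 (m + 1 - 6 * g) = 6 := by omega
  have h2 : min 6 (m - 6 * g) = 6 := by omega
  rw [h1, h2]

-- the inner dict of the active group gains exactly the entry (m % 6, matrix[m])
lemma pv_inner_push (matrix : List Int) (m idx : Nat) (h0 : 6 * idx ≤ m)
    (h1 : m - 6 * idx = m % 6) :
    (pvInner matrix m idx).insert ((m % 6 : Nat) : Int) (matrix.getD m 0)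
      = pvInner matrix (m + 1) idx := by
  have hmin : min 6 (m - 6 * idx) = m % 6 := by omega
  have hcont : (pvInner matrix m idx).contains ((m % 6 : Nat) : Int) = false := by
    simp only [pvInner, PySem.Dict.contains, hmin, List.any_map]
    rw [List.any_eq_false]
    intro j hj
    simp only [List.mem_range] at hj
    simp
    omega
  apply PySem.Dict.ext
  rw [PySem.Dict.items_insert_of_not_contains _ _ hcont]
  simp only [pvInner, hmin]
  have h3 : min 6 (m + 1 - 6 * idx) = m % 6 + 1 := by omega
  rw [h3, List.range_succ, List.map_append]
  have h4 : 6 * idx + m % 6 = m := by omega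
  simp [h4]

-- one step of A's fold, from the invariant state after m elements
lemma pv_step (matrix : List Int) (m : Nat) :
    (fun (st : PySem.Dict Int (PySem.Dict Int Int) × Int) (i : Int) =>
      let st' := if i ≠ 0 ∧ PySem.Int.mod i 6 = 0 then
          (st.1.insert (st.2 + 1) PySem.Dict.empty, st.2 + 1)
        else st
      (st'.1.modify st'.2 PySem.Dict.empty
          (fun inner => inner.insert (PySem.Int.mod i 6) (PySem.List.pyGetD matrix i 0)),
       st'.2)) (pvOuter matrix m, (((m - 1) / 6 : Nat) : Int)) (m : Int)
    = (pvOuter matrix (m + 1), ((m / 6 : Nat) : Int)) := by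
  have hmod : PySem.Int.mod (m : Int) 6 = ((m % 6 : Nat) : Int) := by
    exact_mod_cast PySem.Int.mod_natCast m 6
  simp only [hmod]
  by_cases hc : m ≠ 0 ∧ m % 6 = 0
  · -- a new group is opened
    obtain ⟨hm0, hm6⟩ := hc
    have hcond : ((m : Int) ≠ 0 ∧ ((m % 6 : Nat) : Int) = 0) :=
      ⟨by exact_mod_cast hm0, by simp [hm6]⟩
    rw [if_pos hcond]
    have hcast : (((m - 1) / 6 : Nat) : Int) + 1 = ((m / 6 : Nat) : Int) := by
      push_cast; omega
    simp only [hcast]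
    have hne : ∀ g, g < (m - 1) / 6 + 1 → (g : Int) ≠ ((m / 6 : Nat) : Int) :=
      fun g hg => pv_cast_ne (by omega)
    have hnc : (pvOuter matrix m).contains ((m / 6 : Nat) : Int) = false := by
      simp only [pvOuter, PySem.Dict.contains, List.any_map]
      rw [List.any_eq_false]
      intro g hg
      simp only [List.mem_range] at hg
      simp
      omega
    have hitems1 : ((pvOuter matrix m).insert ((m / 6 : Nat) : Int) PySem.Dict.empty).items
        = (List.range ((m - 1) / 6 + 1)).map
            (fun (g : Nat) => ((g : Int), pvInner matrix m g)) ++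
          [(((m / 6 : Nat) : Int), PySem.Dict.empty)] := by
      rw [PySem.Dict.items_insert_of_not_contains _ _ hnc]; rfl
    have hfind : List.find? (fun p => p.1 == ((m / 6 : Nat) : Int))
          ((pvOuter matrix m).insert ((m / 6 : Nat) : Int) PySem.Dict.empty).items
        = some (((m / 6 : Nat) : Int), PySem.Dict.empty) := by
      rw [hitems1, List.find?_append, pv_find_none _ _ _ hne]
      simp
    have hcont2 : ((pvOuter matrix m).insert ((m / 6 : Nat) : Int) PySem.Dict.empty).contains
        ((m / 6 : Nat) : Int) = true := by
      rw [PySem.Dict.contains_eq_isSome_get?, PySem.Dict.get?, hfind]; rfl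
    rw [Prod.mk.injEq]
    refine ⟨?_, rfl⟩
    simp only [PySem.Dict.modify, PySem.Dict.getD, PySem.Dict.get?, hfind,
      Option.map_some, Option.getD_some, PySem.List.pyGetD_natCast, hm6, Nat.cast_zero]
    apply PySem.Dict.ext
    rw [PySem.Dict.items_insert_of_contains _ _ hcont2, hitems1, List.map_append,
      pv_replace_none _ _ _ _ hne]
    conv_rhs => rw [pvOuter]
    have hG : ((m + 1) - 1) / 6 + 1 = m / 6 + 1 := by omega
    have hG2 : (m - 1) / 6 + 1 = m / 6 := by omega
    rw [hG, hG2, List.range_succ, List.map_append]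
    congr 1
    · apply List.map_congr_left
      intro g hg
      simp only [List.mem_range] at hg
      rw [pv_inner_stable matrix m g (by omega)]
    · have h6 : min 6 (m + 1 - 6 * (m / 6)) = 1 := by omega
      have h7 : 6 * (m / 6) + 0 = m := by omega
      simp [pvInner, h6, h7, PySem.Dict.insert, PySem.Dict.contains, PySem.Dict.empty,
        List.range_succ]
  · -- the current group gains one entry
    have hcond : ¬ ((m : Int) ≠ 0 ∧ ((m % 6 : Nat) : Int) = 0) := by
      intro ⟨h1, h2⟩
      exact hc ⟨by exact_mod_cast h1, by exact_mod_cast h2⟩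
    rw [if_neg hcond]
    have hidx : m / 6 = (m - 1) / 6 := by omega
    have hsub : m - 6 * ((m - 1) / 6) = m % 6 := by omega
    have hne : ∀ g, g < (m - 1) / 6 → (g : Int) ≠ (((m - 1) / 6 : Nat) : Int) :=
      fun g hg => pv_cast_ne (by omega)
    have hfind : List.find? (fun p => p.1 == (((m - 1) / 6 : Nat) : Int)) (pvOuter matrix m).items
        = some ((((m - 1) / 6 : Nat) : Int), pvInner matrix m ((m - 1) / 6)) := by
      show List.find? _ ((List.range ((m - 1) / 6 + 1)).map _) = _
      rw [List.range_succ, List.map_append, List.find?_append, pv_find_none _ _ _ hne]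
      simp
    have hcont : (pvOuter matrix m).contains (((m - 1) / 6 : Nat) : Int) = true := by
      rw [PySem.Dict.contains_eq_isSome_get?, PySem.Dict.get?, hfind]; rfl
    rw [Prod.mk.injEq]
    refine ⟨?_, by rw [hidx]⟩
    simp only [PySem.Dict.modify, PySem.Dict.getD, PySem.Dict.get?, hfind,
      Option.map_some, Option.getD_some, PySem.List.pyGetD_natCast]
    rw [pv_inner_push matrix m ((m - 1) / 6) (by omega) hsub]
    apply PySem.Dict.ext
    rw [PySem.Dict.items_insert_of_contains _ _ hcont]
    conv_lhs => rw [pvOuter, List.range_succ, List.map_append, List.map_append,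
      pv_replace_none _ _ _ _ hne]
    conv_rhs => rw [pvOuter]
    have hG : ((m + 1) - 1) / 6 + 1 = (m - 1) / 6 + 1 := by omega
    rw [hG, List.range_succ, List.map_append]
    congr 1
    · apply List.map_congr_left
      intro g hg
      simp only [List.mem_range] at hg
      rw [pv_inner_stable matrix m g (by omega)]
    · simp

-- A's fold invariant: after m elements the state is the chunk structure of the prefix
lemma pv_fold_inv (matrix : List Int) (m : Nat) :
    (PySem.List.pyRange 0 (m : Int) 1).foldl
      (fun (st : PySem.Dict Int (PySem.Dict Int Int) × Int) i =>
        let st' := if i ≠ 0 ∧ PySem.Int.mod i 6 = 0 then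
            (st.1.insert (st.2 + 1) PySem.Dict.empty, st.2 + 1)
          else st
        (st'.1.modify st'.2 PySem.Dict.empty
            (fun inner => inner.insert (PySem.Int.mod i 6) (PySem.List.pyGetD matrix i 0)),
         st'.2)) ((PySem.Dict.empty).insert 0 PySem.Dict.empty, 0)
    = (pvOuter matrix m, (((m - 1) / 6 : Nat) : Int)) := by
  induction m with
  | zero =>
    rw [PySem.List.pyRange_one_eq_nil (by omega)]
    simp [pvOuter, pvInner, PySem.Dict.insert, PySem.Dict.contains, PySem.Dict.empty,
      List.range_succ]
  | succ m ih =>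
    have hc : ((m + 1 : Nat) : Int) = (m : Int) + 1 := by push_cast; ring
    rw [hc, PySem.List.pyRange_one_succ_right (by omega), List.foldl_append, ih]
    simpa using pv_step matrix m

-- B's chunk stage produces exactly the chunk g = matrix[6g : 6g+6] for each group index g
lemma pv_chunks_eq (xs : List Int) :
    (if ((PySem.List.pyRange 0 (xs.length : Int) 6).map
          (fun i => PySem.List.slice xs (some i) (some (i + 6)))) = []
      then [([] : List Int)]
      else (PySem.List.pyRange 0 (xs.length : Int) 6).map
          (fun i => PySem.List.slice xs (some i) (some (i + 6))))
    = (List.range ((xs.length - 1) / 6 + 1)).map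
        (fun (g : Nat) => (xs.drop (6 * g)).take 6) := by
  rw [PySem.List.pyRange_of_pos 0 (xs.length : Int) (by norm_num)]
  by_cases h0 : xs.length = 0
  · have hxs : xs = [] := List.eq_nil_of_length_eq_zero h0
    subst hxs
    simp
  · have hlt : (0 : Int) < (xs.length : Int) := by exact_mod_cast Nat.pos_of_ne_zero h0
    rw [if_pos hlt]
    have hcnt : (((xs.length : Int) - 0 + 6 - 1) / 6).toNat = (xs.length - 1) / 6 + 1 := by
      omega
    rw [hcnt]
    have hne : (List.map (fun i => PySem.List.slice xs (some i) (some (i + 6)))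
        (List.map (fun (k : Nat) => (0 : Int) + 6 * (k : Int)) (List.range ((xs.length - 1) / 6 + 1)))) ≠ [] := by
      simp
    rw [if_neg hne, List.map_map]
    apply List.map_congr_left
    intro g _
    simp only [Function.comp]
    have h1 : (0 : Int) + 6 * (g : Int) = ((6 * g : Nat) : Int) := by push_cast; ring
    have h2 : ((6 * g : Nat) : Int) + 6 = ((6 * g + 6 : Nat) : Int) := by push_cast; ring
    rw [h1, h2, PySem.List.slice_natCast]
    congr 1
    omega

-- enumerate over a mapped range numbers the groups 0,1,2,…
lemma pv_enumerate_map_range {α : Type} (G : Nat) (f : Nat → α) :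
    PySem.List.enumerate ((List.range G).map f) 0
      = (List.range G).map (fun (g : Nat) => ((g : Int), f g)) := by
  induction G with
  | zero => simp [PySem.List.enumerate_nil]
  | succ G ih =>
    rw [List.range_succ, List.map_append, List.map_append,
      PySem.List.enumerate_append, ih]
    simp [PySem.List.enumerate_cons, PySem.List.enumerate_nil]

-- enumerating a chunk yields the (offset, element) pairs of the closed-form inner dict
lemma pv_enumerate_chunk (matrix : List Int) (g : Nat) :
    PySem.List.enumerate ((matrix.drop (6 * g)).take 6) 0
      = (List.range (min 6 (matrix.length - 6 * g))).map
          (fun (j : Nat) => ((j : Int), matrix.getD (6 * g + j) 0)) := by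
  have hlen : ((matrix.drop (6 * g)).take 6).length = min 6 (matrix.length - 6 * g) := by
    simp
  apply List.ext_getElem
  · rw [PySem.List.length_enumerate, hlen]; simp
  · intro k h1 h2
    rw [PySem.List.getElem_enumerate]
    have hk : k < min 6 (matrix.length - 6 * g) := by
      rw [PySem.List.length_enumerate, hlen] at h1; exact h1
    have hkm : 6 * g + k < matrix.length := by omega
    have hget : ((matrix.drop (6 * g)).take 6)[k]'(by rw [hlen]; exact hk)
        = matrix[6 * g + k]'hkm := by
      rw [List.getElem_take, List.getElem_drop]
    simp only [List.getElem_map, List.getElem_range]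
    rw [hget, List.getD_eq_getElem _ _ hkm]
    simp

-- ===== VERDICT (by name: the statement is the Claim_ definition above) =====
theorem getSubBlocs_spec : Claim_equal_getSubBlocs := by
  intro matrix _
  unfold Spec_getSubBlocs
  have h := pv_fold_inv matrix matrix.length
  simp only [getSubBlocs, getSubBlocs_alt, h]
  rw [pv_chunks_eq, pv_enumerate_map_range, List.map_map]
  simp only [pvOuter, List.map_map]
  apply List.map_congr_left
  intro g _
  simp only [Function.comp]
  refine congrArg _ ?_
  show (pvInner matrix matrix.length g).items = _
  rw [pv_enumerate_chunk matrix g]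
  rfl
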